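-- pv_equiv track=rewrite | github.com/MINSANG-GU/cloud_version_demo | pages/beam_column.py | clean_text_value
-- ===== SOURCE A (Python) =====
-- def clean_text_value(text):
--     cleaned_text = ''.join([char for char in text if char.isdigit() or char == '.'])
--     if cleaned_text.count('.') > 1:
--         first_dot_index = cleaned_text.find('.')
--         cleaned_text = cleaned_text[:first_dot_index+1] + cleaned_text[first_dot_index+1:].replace('.', '')
--     if cleaned_text.endswith('.'):
--         cleaned_text = cleaned_text[:-1]
--     return cleaned_text if cleaned_text else "1"
-- ===== SOURCE B (Python) =====
-- def clean_text_value(text):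
--     out = []
--     seen_dot = False
--     for ch in text:
--         if ch.isdigit():
--             out.append(ch)
--         elif ch == '.' and not seen_dot:
--             out.append(ch)
--             seen_dot = True
--     s = ''.join(out)
--     if s.endswith('.'):
--         s = s[:-1]
--     return s if s else "1"
-- ===== Notes on version B (the rewrite author's own statement) =====
-- stated objective: simpler
-- what changed: A's multi-pass pipeline (filter comprehension + count/find/replace dot-collapse) is replaced by one stateful scan over the characters with a seen-dot flag, followed by the same trailing-dot strip and empty default.
import Mathlib
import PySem

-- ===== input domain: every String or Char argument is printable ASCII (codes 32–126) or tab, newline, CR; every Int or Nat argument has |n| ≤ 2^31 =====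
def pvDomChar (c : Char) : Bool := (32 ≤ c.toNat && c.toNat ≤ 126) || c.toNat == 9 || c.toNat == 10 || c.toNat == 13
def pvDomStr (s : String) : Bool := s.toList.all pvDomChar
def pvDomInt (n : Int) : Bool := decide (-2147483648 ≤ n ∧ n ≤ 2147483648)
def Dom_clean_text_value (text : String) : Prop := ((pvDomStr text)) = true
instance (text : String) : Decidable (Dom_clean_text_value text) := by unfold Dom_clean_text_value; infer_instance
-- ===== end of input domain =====

-- B replaces A's filter-then-count/find/replace multi-pass pipeline by one stateful
-- scan with a seen-dot flag (objective: simpler).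

-- ===== PORT A =====
-- A, step for step on the code-point list: join of the filtered comprehension,
-- the count/find/slice/replace collapse of extra dots, trailing-dot strip, empty → "1".
def clean_text_value (text : String) : String :=
  let cleaned0 : List Char :=
    PySem.Chars.join []
      ((text.toList.filter (fun c => PySem.Chars.isdigit c || c == '.')).map (fun c => [c]))
  let cleaned1 : List Char :=
    if PySem.Chars.count cleaned0 ['.'] > 1 then
      let firstDot : Int := PySem.Chars.find cleaned0 ['.']
      PySem.Chars.slice cleaned0 none (some (firstDot + 1)) ++
        PySem.Chars.replace (PySem.Chars.slice cleaned0 (some (firstDot + 1)) none) ['.'] []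
    else cleaned0
  let cleaned2 : List Char :=
    if PySem.Chars.endswith cleaned1 ['.'] then PySem.Chars.slice cleaned1 none (some (-1))
    else cleaned1
  if cleaned2 = [] then "1" else String.ofList cleaned2

-- ===== PORT B =====
-- B, step for step: the for-loop is a foldl over the characters carrying
-- (out, seen_dot); then join, trailing-dot strip, empty → "1".
def clean_text_value_alt (text : String) : String :=
  let st : List Char × Bool :=
    text.toList.foldl
      (fun (st : List Char × Bool) ch =>
        if PySem.Chars.isdigit ch then (st.1 ++ [ch], st.2)
        else if ch == '.' && !st.2 then (st.1 ++ [ch], true)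
        else st)
      ([], false)
  let s : List Char := st.1
  let s : List Char :=
    if PySem.Chars.endswith s ['.'] then PySem.Chars.slice s none (some (-1)) else s
  if s = [] then "1" else String.ofList s

-- ===== PRECONDITION & SPEC =====
def Spec_clean_text_value (text : String) (out : String) : Prop := out = clean_text_value_alt text
instance (text : String) (out : String) : Decidable (Spec_clean_text_value text out) := by unfold Spec_clean_text_value; infer_instance

-- ===== CLAIM (what is proved, stated in full; the proofs are below) =====
def Claim_equal_clean_text_value : Prop := ∀ (text : String), Dom_clean_text_value text → Spec_clean_text_value text (clean_text_value text)

-- ===== LEMMAS AND PROOFS =====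

-- the character filter A applies
def pvKeep (c : Char) : Bool := PySem.Chars.isdigit c || c == '.'

-- B's loop, as a structural recursion (proved equal to the foldl below)
def pvScan : List Char → Bool → List Char × Bool
  | [], seen => ([], seen)
  | c :: cs, seen =>
    if PySem.Chars.isdigit c then
      let r := pvScan cs seen; (c :: r.1, r.2)
    else if c == '.' && !seen then
      let r := pvScan cs true; (c :: r.1, r.2)
    else pvScan cs seen

lemma pvScan_foldl (l : List Char) (acc : List Char) (seen : Bool) :
    l.foldl
      (fun (st : List Char × Bool) ch =>
        if PySem.Chars.isdigit ch then (st.1 ++ [ch], st.2)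
        else if ch == '.' && !st.2 then (st.1 ++ [ch], true)
        else st)
      (acc, seen) = (acc ++ (pvScan l seen).1, (pvScan l seen).2) := by
  induction l generalizing acc seen with
  | nil => simp [pvScan]
  | cons c cs ih =>
    simp only [List.foldl_cons]
    by_cases hd : PySem.Chars.isdigit c
    · rw [if_pos hd, ih]
      simp [pvScan, hd]
    · by_cases he : (c == '.' && !seen) = true
      · rw [if_neg hd, if_pos he, ih]
        have hc : c = '.' := by revert he; cases seen <;> simp_all
        have hs : seen = false := by revert he; cases seen <;> simp_all
        subst hc hs
        simp [pvScan, hd]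
      · rw [if_neg hd, if_neg he, ih]
        simp [pvScan, hd, he]

-- count.go with single-char needle counts occurrences
lemma pvCountGo (fuel : Nat) (s : List Char) (acc : Nat) (h : s.length ≤ fuel) :
    PySem.Chars.count.go ['.'] fuel s acc = acc + s.count '.' := by
  induction fuel generalizing s acc with
  | zero =>
    have : s = [] := List.length_eq_zero_iff.mp (Nat.le_zero.mp h)
    subst this; simp [PySem.Chars.count.go]
  | succ n ih =>
    cases s with
    | nil => simp [PySem.Chars.count.go]
    | cons c t =>
      rw [PySem.Chars.count.go]
      by_cases hc : c = '.'
      · subst hc; simp [List.isPrefixOf, ih t (acc+1) (by simpa using Nat.lt_succ_iff.mp (by simpa using h))]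
        omega
      · simp [List.isPrefixOf, show ('.' = c) ↔ False from ⟨fun e => hc e.symm, False.elim⟩,
          ih t acc (by simpa using Nat.lt_succ_iff.mp (by simpa using h)), hc]

lemma pvCount (s : List Char) : PySem.Chars.count s ['.'] = s.count '.' := by
  rw [PySem.Chars.count]
  simpa using pvCountGo s.length s 0 le_rfl

-- replace.go removing single chars is a filter
lemma pvReplaceGo (fuel : Nat) (s : List Char) (acc : List Char) (h : s.length ≤ fuel) :
    PySem.Chars.replace.go ['.'] [] fuel s acc = acc.reverse ++ s.filter (· != '.') := by
  induction fuel generalizing s acc with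
  | zero =>
    have : s = [] := List.length_eq_zero_iff.mp (Nat.le_zero.mp h)
    subst this; simp [PySem.Chars.replace.go]
  | succ n ih =>
    cases s with
    | nil => simp [PySem.Chars.replace.go]
    | cons c t =>
      have ht : t.length ≤ n := by simpa using Nat.lt_succ_iff.mp (by simpa using h)
      rw [PySem.Chars.replace.go]
      by_cases hc : c = '.'
      · subst hc
        simp [List.isPrefixOf, ih t acc ht]
      · simp [List.isPrefixOf, show ('.' = c) ↔ False from ⟨fun e => hc e.symm, False.elim⟩,
          ih t (c :: acc) ht, hc]

lemma pvReplace (s : List Char) :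
    PySem.Chars.replace s ['.'] [] = s.filter (· != '.') := by
  simpa using pvReplaceGo s.length s [] le_rfl

-- find of the first dot
lemma pvFindDot (a b : List Char) (ha : '.' ∉ a) :
    PySem.Chars.find (a ++ '.' :: b) ['.'] = (a.length : Int) := by
  have hinf : ['.'] <:+: (a ++ '.' :: b) := ⟨a, b, by simp⟩
  have h0 : 0 ≤ PySem.Chars.find (a ++ '.' :: b) ['.'] :=
    (PySem.Chars.find_nonneg_iff _ _).mpr hinf
  obtain ⟨hpre, hmin⟩ := PySem.Chars.find_spec h0
  set n := (PySem.Chars.find (a ++ '.' :: b) ['.']).toNat with hn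
  have hat : ['.'] <+: (a ++ '.' :: b).drop a.length := by
    rw [List.drop_left]
    exact ⟨b, rfl⟩
  have hle : n ≤ a.length := by
    by_contra hlt
    exact hmin a.length (by omega) hat
  have hge : ¬ n < a.length := by
    intro hlt
    obtain ⟨t, ht⟩ := hpre
    have : (a ++ '.' :: b)[n]? = some '.' := by
      rw [← List.head?_drop, ← ht]; rfl
    rw [List.getElem?_append_left hlt] at this
    exact ha (List.mem_of_getElem? this)
  have : n = a.length := by omega
  omega

-- the character filter commutes into B's scan (skipped characters change nothing)
lemma pvScan_filter (l : List Char) (seen : Bool) :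
    pvScan l seen = pvScan (l.filter pvKeep) seen := by
  induction l generalizing seen with
  | nil => rfl
  | cons c cs ih =>
    by_cases hd : PySem.Chars.isdigit c
    · simp [pvScan, pvKeep, hd, ih]
    · by_cases hc : c = '.'
      · subst hc
        simp [pvScan, pvKeep, hd, ih]
      · simp [pvScan, pvKeep, hd, hc, ih]

lemma pvScan_digits (f : List Char) (seen : Bool) (h : ∀ c ∈ f, PySem.Chars.isdigit c) :
    (pvScan f seen).1 = f := by
  induction f generalizing seen with
  | nil => rfl
  | cons c cs ih =>
    simp [pvScan, h c (by simp), ih _ (fun x hx => h x (by simp [hx]))]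

lemma pvScan_true (f : List Char) (h : ∀ c ∈ f, pvKeep c) :
    (pvScan f true).1 = f.filter (· != '.') := by
  induction f with
  | nil => rfl
  | cons c cs ih =>
    have hk := h c (by simp)
    by_cases hd : PySem.Chars.isdigit c
    · have hne : (c != '.') = true := by
        simp only [bne_iff_ne, ne_eq]
        intro e; subst e; simp [PySem.Chars.isdigit] at hd
      simp [pvScan, hd, hne, ih (fun x hx => h x (by simp [hx]))]
    · have hc : c = '.' := by simp [pvKeep, hd] at hk; exact hk
      subst hc
      simp [pvScan, hd, ih (fun x hx => h x (by simp [hx]))]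

lemma pvScan_first_dot (a b : List Char) (ha : ∀ c ∈ a, PySem.Chars.isdigit c)
    (hb : ∀ c ∈ b, pvKeep c) :
    (pvScan (a ++ '.' :: b) false).1 = a ++ '.' :: b.filter (· != '.') := by
  induction a with
  | nil =>
    have : ¬ PySem.Chars.isdigit '.' := by decide
    simp [pvScan, this, pvScan_true b hb]
  | cons c cs ih =>
    simp [pvScan, ha c (by simp), ih (fun x hx => ha x (by simp [hx]))]

lemma pvFirstDot (f : List Char) (h : '.' ∈ f) :
    ∃ a b, f = a ++ '.' :: b ∧ '.' ∉ a := by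
  induction f with
  | nil => simp at h
  | cons c cs ih =>
    by_cases hc : c = '.'
    · exact ⟨[], cs, by simp [hc], by simp⟩
    · have hcs : '.' ∈ cs := by
        rcases List.mem_cons.mp h with h' | h'
        · exact absurd h'.symm hc
        · exact h'
      obtain ⟨a, b, rfl, hna⟩ := ih hcs
      refine ⟨c :: a, b, rfl, ?_⟩
      intro hm
      rcases List.mem_cons.mp hm with e | e
      · exact hc e.symm
      · exact hna e

-- main: A's collapse pipeline equals B's scan, on any all-kept character list
lemma pvMain (f : List Char) (hf : ∀ c ∈ f, pvKeep c) :
    (if PySem.Chars.count f ['.'] > 1 then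
      PySem.Chars.slice f none (some (PySem.Chars.find f ['.'] + 1)) ++
        PySem.Chars.replace (PySem.Chars.slice f (some (PySem.Chars.find f ['.'] + 1)) none) ['.'] []
    else f) = (pvScan f false).1 := by
  by_cases hd : '.' ∈ f
  · obtain ⟨a, b, rfl, hna⟩ := pvFirstDot f hd
    have hadig : ∀ c ∈ a, PySem.Chars.isdigit c := by
      intro c hc
      have := hf c (by simp [hc])
      have hne : c ≠ '.' := fun e => hna (e ▸ hc)
      simpa [pvKeep, hne] using this
    have hbk : ∀ c ∈ b, pvKeep c := fun c hc => hf c (by simp [hc])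
    rw [pvScan_first_dot a b hadig hbk, pvCount, pvFindDot a b hna]
    have hcnt : List.count '.' (a ++ '.' :: b) = 1 + List.count '.' b := by
      simp [List.count_append, List.count_eq_zero.mpr hna, Nat.add_comm]
    by_cases hb : '.' ∈ b
    · have h1 : 1 < List.count '.' (a ++ '.' :: b) := by
        have := List.count_pos_iff.mpr hb
        omega
      rw [if_pos h1]
      have hcast : (a.length : Int) + 1 = ((a.length + 1 : Nat) : Int) := by push_cast; ring
      rw [hcast, PySem.Chars.slice_eq_listSlice, PySem.Chars.slice_eq_listSlice,
        PySem.List.slice_to_natCast, PySem.List.slice_from_natCast]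
      have htake : (a ++ '.' :: b).take (a.length + 1) = a ++ ['.'] := by
        have : a ++ '.' :: b = (a ++ ['.']) ++ b := by simp
        rw [this, List.take_left' (by simp)]
      have hdrop : (a ++ '.' :: b).drop (a.length + 1) = b := by
        have : a ++ '.' :: b = (a ++ ['.']) ++ b := by simp
        rw [this, List.drop_left' (by simp)]
      rw [htake, hdrop, pvReplace]
      simp
    · have h1 : ¬ 1 < List.count '.' (a ++ '.' :: b) := by
        have := List.count_eq_zero.mpr hb
        omega
      rw [if_neg h1]
      have hbf : b.filter (· != '.') = b := by
        apply List.filter_eq_self.mpr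
        intro c hc
        simp only [bne_iff_ne, ne_eq]
        exact fun e => hb (e ▸ hc)
      rw [hbf]
  · have h0 : ¬ 1 < PySem.Chars.count f ['.'] := by
      rw [pvCount, List.count_eq_zero.mpr hd]; omega
    rw [if_neg h0, pvScan_digits f false]
    intro c hc
    have := hf c hc
    have hne : c ≠ '.' := fun e => hd (e ▸ hc)
    simpa [pvKeep, hne] using this

theorem clean_text_value_spec : Claim_equal_clean_text_value := by
  intro text _
  unfold Spec_clean_text_value clean_text_value clean_text_value_alt
  rw [pvScan_foldl, pvScan_filter]
  have hjoin : PySem.Chars.join []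
      ((text.toList.filter (fun c => PySem.Chars.isdigit c || c == '.')).map (fun c => [c])) =
      text.toList.filter (fun c => PySem.Chars.isdigit c || c == '.') :=
    PySem.Chars.join_nil_singletons _
  rw [hjoin]
  have hkeep : (fun c => PySem.Chars.isdigit c || c == '.') = pvKeep := rfl
  rw [hkeep]
  rw [← pvMain (text.toList.filter pvKeep) (fun c hc => (List.mem_filter.mp hc).2)]
  simp
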